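-- pv_equiv track=rewrite | github.com/403summer/CODING | 프로그래머스/lv0/120842. 2차원으로 만들기/2차원으로 만들기.py | solution
-- ===== SOURCE A (Python) =====
-- def solution(num_list, n):
--     list_2d = []
--     count = len(num_list)//n
--     for _ in range(count):
--         list_1d = []
--         for _ in range(n):
--             list_1d.append(num_list.pop(0))
--         list_2d.append(list_1d)
--     return list_2d
-- ===== SOURCE B (Python) =====
-- def solution(num_list, n):
--     return [num_list[i*n:(i+1)*n] for i in range(len(num_list)//n)]
-- ===== Notes on version B (the rewrite author's own statement) =====
-- stated objective: idiomatic
-- what changed: B builds each chunk by list slicing in a single comprehension instead of A's nested loops that pop(0) element by element (and B does not mutate num_list; the equivalence is about the return value only).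
-- outside the precondition, e.g. on solution([1, 2, 3], 0): A raises ZeroDivisionError, B raises ZeroDivisionError
import Mathlib
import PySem

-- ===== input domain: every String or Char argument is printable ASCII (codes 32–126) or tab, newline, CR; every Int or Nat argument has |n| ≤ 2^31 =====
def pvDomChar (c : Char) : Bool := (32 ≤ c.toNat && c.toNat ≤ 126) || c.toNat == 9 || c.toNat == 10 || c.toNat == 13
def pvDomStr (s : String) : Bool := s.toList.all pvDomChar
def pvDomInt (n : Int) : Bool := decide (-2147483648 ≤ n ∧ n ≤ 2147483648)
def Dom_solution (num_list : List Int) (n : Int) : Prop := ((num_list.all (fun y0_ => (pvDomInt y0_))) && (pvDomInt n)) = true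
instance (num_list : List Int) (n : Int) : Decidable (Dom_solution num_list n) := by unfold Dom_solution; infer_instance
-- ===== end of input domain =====

-- B replaces A's nested pop(0) loops by one slicing comprehension; B does not mutate
-- num_list (A empties its consumed prefix) — the equivalence proved is about the return value only.

-- ===== PORT A =====
-- literal port of A: count = len(num_list)//n, then nested for-loops popping the head
def solution (num_list : List Int) (n : Int) : List (List Int) :=
  let count := PySem.Int.floordiv (num_list.length : Int) n
  ((PySem.List.pyRange 0 count 1).foldl (fun (st : List Int × List (List Int)) _ =>
      let inner := (PySem.List.pyRange 0 n 1).foldl (fun (st2 : List Int × List Int) _ =>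
          match st2.1 with
          | [] => st2   -- num_list.pop(0) raises IndexError here; unreachable when n ≠ 0
          | x :: rest => (rest, st2.2 ++ [x])) (st.1, ([] : List Int))
      (inner.1, st.2 ++ [inner.2])) (num_list, ([] : List (List Int)))).2

-- ===== PORT B =====
-- literal port of B: [num_list[i*n:(i+1)*n] for i in range(len(num_list)//n)]
def solution_alt (num_list : List Int) (n : Int) : List (List Int) :=
  (PySem.List.pyRange 0 (PySem.Int.floordiv (num_list.length : Int) n) 1).map
    (fun i => PySem.List.slice num_list (some (i * n)) (some ((i + 1) * n)))

-- ===== PRECONDITION & SPEC =====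
-- n = 0 makes len(num_list)//n raise ZeroDivisionError in both A and B; nothing else raises.
def Pre_solution (num_list : List Int) (n : Int) : Prop := n ≠ 0
instance (num_list : List Int) (n : Int) : Decidable (Pre_solution num_list n) := by unfold Pre_solution; infer_instance
def pvWitness_solution : List Int × Int := ([1, 2, 3, 4, 5], 2)

def Spec_solution (num_list : List Int) (n : Int) (out : List (List Int)) : Prop := out = solution_alt num_list n
instance (num_list : List Int) (n : Int) (out : List (List Int)) : Decidable (Spec_solution num_list n out) := by unfold Spec_solution; infer_instance

-- ===== CLAIM (what is proved, stated in full; the proofs are below) =====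
def Claim_equal_solution : Prop := ∀ (num_list : List Int) (n : Int), Dom_solution num_list n → Pre_solution num_list n → Spec_solution num_list n (solution num_list n)

-- ===== LEMMAS AND PROOFS =====

-- named forms of A's two loop bodies (identical, definitionally, to the lambdas in the port)
def popStep (st2 : List Int × List Int) (_ : Int) : List Int × List Int :=
  match st2.1 with
  | [] => st2
  | x :: rest => (rest, st2.2 ++ [x])

def chunkStep (n : Int) (st : List Int × List (List Int)) (_ : Int) : List Int × List (List Int) :=
  let inner := (PySem.List.pyRange 0 n 1).foldl popStep (st.1, ([] : List Int))
  (inner.1, st.2 ++ [inner.2])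

theorem solution_eq (num_list : List Int) (n : Int) :
    solution num_list n
      = ((PySem.List.pyRange 0 (PySem.Int.floordiv (num_list.length : Int) n) 1).foldl
          (chunkStep n) (num_list, ([] : List (List Int)))).2 := rfl

-- the chunk list A builds: k groups of m consecutive elements taken off the front
def chunksOf (m : Nat) : List Int → Nat → List (List Int)
  | _, 0 => []
  | xs, k + 1 => xs.take m :: chunksOf m (xs.drop m) k

-- A's inner loop: folding the pop-step over any list l of indices pops l.length heads
theorem inner_fold_eq (l : List Int) (xs acc : List Int) (h : l.length ≤ xs.length) :
    l.foldl popStep (xs, acc) = (xs.drop l.length, acc ++ xs.take l.length) := by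
  induction l generalizing xs acc with
  | nil => simp
  | cons a t ih =>
    cases xs with
    | nil => simp at h
    | cons x rest =>
      simp only [List.foldl_cons, List.length_cons, List.drop_succ_cons, List.take_succ_cons]
      have : popStep (x :: rest, acc) a = (rest, acc ++ [x]) := rfl
      rw [this, ih rest (acc ++ [x]) (by simpa using Nat.le_of_succ_le_succ h)]
      simp

-- A's outer loop: folding the chunk-step over l builds chunksOf and drops l.length*m elements
theorem outer_fold_eq (m : Nat) (l : List Int) (xs : List Int) (acc : List (List Int))
    (h : l.length * m ≤ xs.length) :
    l.foldl (chunkStep (m : Int)) (xs, acc)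
      = (xs.drop (l.length * m), acc ++ chunksOf m xs l.length) := by
  induction l generalizing xs acc with
  | nil => simp [chunksOf]
  | cons a t ih =>
    have hm : m ≤ xs.length := by
      simp only [List.length_cons] at h
      nlinarith [Nat.zero_le (t.length * m)]
    have hlen : (PySem.List.pyRange 0 (m : Int) 1).length = m := by
      simp [PySem.List.length_pyRange_one]
    have hstep : chunkStep (m : Int) (xs, acc) a = (xs.drop m, acc ++ [xs.take m]) := by
      unfold chunkStep
      rw [inner_fold_eq _ xs [] (by rw [hlen]; exact hm), hlen]
      simp
    simp only [List.foldl_cons]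
    rw [List.length_cons, Nat.succ_mul] at h
    rw [hstep, ih (xs.drop m) (acc ++ [xs.take m]) (by
      simp only [List.length_drop]
      omega)]
    simp only [List.length_cons, List.drop_drop, chunksOf, Nat.succ_mul]
    rw [Nat.add_comm]
    simp

theorem chunksOf_eq_map (m : Nat) (k : Nat) (xs : List Int) :
    chunksOf m xs k = (List.range k).map (fun j => (xs.drop (j * m)).take m) := by
  induction k generalizing xs with
  | zero => simp [chunksOf]
  | succ k ih =>
    rw [List.range_succ_eq_map]
    simp only [chunksOf, List.map_cons, Nat.zero_mul, List.drop_zero, List.map_map]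
    rw [ih]
    congr 1
    apply List.map_congr_left
    intro j hj
    simp only [Function.comp_apply, List.drop_drop]
    congr 2
    rw [Nat.succ_mul]
    omega

-- ===== VERDICT =====
theorem solution_spec : Claim_equal_solution := by
  intro num_list n _ hn
  unfold Pre_solution at hn
  unfold Spec_solution
  rw [solution_eq]
  rcases lt_trichotomy n 0 with hneg | hz | hpos
  · -- n < 0 : count ≤ 0, both sides empty
    have hcnt : PySem.Int.floordiv (num_list.length : Int) n ≤ 0 := by
      by_cases h0 : PySem.Int.floordiv (num_list.length : Int) n ≤ 0
      · exact h0
      have hc : 0 < PySem.Int.floordiv (num_list.length : Int) n := by omega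
      have hmb := (PySem.Int.mod_neg_bounds (a := (num_list.length : Int)) (b := n) hneg).2
      have heq := PySem.Int.floordiv_mul_add_mod (num_list.length : Int) n
      nlinarith [Int.natCast_nonneg num_list.length]
    unfold solution_alt
    rw [PySem.List.pyRange_one_eq_nil hcnt]
    simp
  · exact absurd hz hn
  · -- n > 0
    obtain ⟨m, rfl⟩ : ∃ m : Nat, n = (m : Int) := ⟨n.toNat, (Int.toNat_of_nonneg hpos.le).symm⟩
    have hm : 0 < m := by exact_mod_cast hpos
    set k := num_list.length / m with hk
    have hcnt : PySem.Int.floordiv (num_list.length : Int) (m : Int) = (k : Int) :=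
      PySem.Int.floordiv_natCast _ _
    rw [hcnt]
    unfold solution_alt
    rw [hcnt]
    have hkm : k * m ≤ num_list.length := Nat.div_mul_le_self _ _
    have hlenk : (PySem.List.pyRange 0 (k : Int) 1).length = k := by
      simp [PySem.List.length_pyRange_one]
    rw [outer_fold_eq m (PySem.List.pyRange 0 (k : Int) 1) num_list [] (by rw [hlenk]; exact hkm)]
    rw [hlenk]
    rw [PySem.List.pyRange_one (0 : Int) (k : Int)]
    simp only [Int.sub_zero, Int.toNat_natCast, List.map_map]
    rw [chunksOf_eq_map]
    simp only [List.nil_append]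
    apply List.map_congr_left
    intro j hj
    simp only [Function.comp_apply, Int.zero_add]
    have h1 : (j : Int) * (m : Int) = ((j * m : Nat) : Int) := by push_cast; ring
    have h2 : ((j : Int) + 1) * (m : Int) = (((j + 1) * m : Nat) : Int) := by push_cast; ring
    rw [h1, h2, PySem.List.slice_natCast]
    congr 1
    rw [Nat.add_mul, Nat.one_mul]
    omega
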